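-- pv_equiv track=rewrite | github.com/RikSmits06/AdventOfCode2024 | day12/main.py | sidesLeft
-- ===== SOURCE A (Python) =====
-- def calcSidesDiff(group):
--     if len(group) == 1:
--         return 1
--     sides = 0
--     i = 0
--     last = -10
--     while i < len(group):
--         if group[i] - last != 1:
--             sides += 1
--         last = group[i]
--         i += 1
--     return sides
--
-- def sidesLeft(borders):
--     sides = 0
--     sortedborders = [(c[0], c[1]) for c in borders if c[2] == "left"]
--     groups = {}
--     for b in sortedborders:
--         if b[0] in groups.keys():
--             groups[b[0]].append(b[1])
--         else:
--             groups[b[0]] = [b[1]]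
--     for group in groups.values():
--         group.sort()
--         sides += calcSidesDiff(group)
--     return sides
-- ===== SOURCE B (Python) =====
-- def sidesLeft(borders):
--     lefts = [(c[0], c[1]) for c in borders if c[2] == "left"]
--     cells = set(lefts)
--     return sum(1 for (col, row) in cells if (col, row - 1) not in cells) + (len(lefts) - len(cells))
-- ===== Notes on version B (the rewrite author's own statement) =====
-- stated objective: simpler
-- what changed: B replaces A's per-column dict grouping, per-group sort and consecutive-run scan by a single set of (col,row) cells: a vertical side-run starts exactly where the cell above is absent, so sides = #{(c,r) in set : (c,r-1) not in set} plus a duplicate correction (total entries - set size).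
-- intended difference: On inputs where some column's left borders number at least two and their minimal row is exactly -9, A's '-10' sentinel makes the first run of that column uncounted (A returns one less per such column), while B counts it; B's value is the intended number of sides since -10 is only a sentinel meant to be adjacent to no real row. — e.g. on sidesLeft([(0, -9, "left"), (0, 0, "left")]): A returns 1, B returns 2
import Mathlib
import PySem

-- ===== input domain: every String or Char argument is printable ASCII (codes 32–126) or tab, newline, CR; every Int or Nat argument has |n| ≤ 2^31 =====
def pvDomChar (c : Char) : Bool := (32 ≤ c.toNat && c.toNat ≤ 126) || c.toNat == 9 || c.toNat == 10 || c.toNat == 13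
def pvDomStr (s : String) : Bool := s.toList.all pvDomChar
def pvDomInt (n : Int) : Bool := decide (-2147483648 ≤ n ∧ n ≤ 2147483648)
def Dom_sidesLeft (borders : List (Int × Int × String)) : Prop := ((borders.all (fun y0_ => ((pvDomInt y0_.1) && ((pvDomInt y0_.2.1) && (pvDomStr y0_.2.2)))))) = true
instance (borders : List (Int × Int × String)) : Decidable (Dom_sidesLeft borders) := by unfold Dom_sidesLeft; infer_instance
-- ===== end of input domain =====

-- B replaces A's per-column grouping + sort + run scan by one set of (col,row) cells with an
-- upward-neighbour test plus a duplicate correction; A's '-10' run sentinel miscounts columns whose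
-- minimal row is exactly -9 (see D_sidesLeft below), where B returns the intended count.


-- ===== PORT A =====
def calcSidesDiff (group : List Int) : Int :=
  if group.length = 1 then 1
  else
    (group.foldl
      (fun (st : Int × Int) g => if g - st.2 ≠ 1 then (st.1 + 1, g) else (st.1, g))
      (0, -10)).1

def sidesLeft (borders : List (Int × Int × String)) : Int :=
  let sortedborders := (borders.filter (fun c => c.2.2 == "left")).map (fun c => (c.1, c.2.1))
  let groups := sortedborders.foldl
    (fun (d : PySem.Dict Int (List Int)) b =>
      if d.contains b.1 then d.modify b.1 [] (fun l => l ++ [b.2])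
      else d.insert b.1 [b.2])
    PySem.Dict.empty
  groups.values.foldl (fun sides group => sides + calcSidesDiff (PySem.List.sorted group id)) 0

-- ===== PORT B =====
def sidesLeft_alt (borders : List (Int × Int × String)) : Int :=
  let lefts := (borders.filter (fun c => c.2.2 == "left")).map (fun c => (c.1, c.2.1))
  let cells : PySem.Set (Int × Int) := PySem.Set.ofList lefts
  cells.foldl (fun (acc : Int) p => if PySem.Set.contains cells (p.1, p.2 - 1) then acc else acc + 1) 0
    + ((lefts.length : Int) - (cells.length : Int))

-- ===== PRECONDITION & SPEC =====
-- On inputs where some column has at least two "left" border entries and the minimal row among them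
-- is exactly -9, A's 'last = -10' sentinel silently swallows the first vertical run of that column
-- (A returns one side less per such column), while B counts it; B's value is the intended side
-- count since -10 is only a sentinel meant to be adjacent to no real row.
def D_sidesLeft (borders : List (Int × Int × String)) : Prop :=
  ∃ p ∈ borders, p.2 = (-9, "left") ∧
    (∃ q ∈ borders.erase p, q.1 = p.1 ∧ q.2.2 = "left") ∧
    ∀ q ∈ borders, q.1 = p.1 → q.2.2 = "left" → -9 ≤ q.2.1
instance (borders : List (Int × Int × String)) : Decidable (D_sidesLeft borders) := by
  unfold D_sidesLeft; infer_instance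

def Spec_sidesLeft (borders : List (Int × Int × String)) (out : Int) : Prop :=
  ¬ D_sidesLeft borders → out = sidesLeft_alt borders
instance (borders : List (Int × Int × String)) (out : Int) : Decidable (Spec_sidesLeft borders out) := by
  unfold Spec_sidesLeft; infer_instance

def pvDiffWitness_sidesLeft : (List (Int × Int × String)) := [(0, -9, "left"), (0, 0, "left")]
def pvDiffWitnessOut_sidesLeft : Int × Int := (1, 2)

-- ===== CLAIM (what is proved, stated in full; the proofs are below) =====
def Claim_unchanged_sidesLeft : Prop := ∀ (borders : List (Int × Int × String)), Dom_sidesLeft borders → Spec_sidesLeft borders (sidesLeft borders)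
def Claim_changed_sidesLeft : Prop := Dom_sidesLeft (pvDiffWitness_sidesLeft) ∧ D_sidesLeft (pvDiffWitness_sidesLeft) ∧ sidesLeft (pvDiffWitness_sidesLeft) = pvDiffWitnessOut_sidesLeft.1 ∧ sidesLeft_alt (pvDiffWitness_sidesLeft) = pvDiffWitnessOut_sidesLeft.2 ∧ pvDiffWitnessOut_sidesLeft.1 ≠ pvDiffWitnessOut_sidesLeft.2
def Claim_exact_sidesLeft : Prop := ∀ (borders : List (Int × Int × String)), Dom_sidesLeft borders → D_sidesLeft borders → sidesLeft borders ≠ sidesLeft_alt borders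

-- ===== LEMMAS AND PROOFS =====

/-- The "left" cells of the input, as (column, row) pairs (A's `sortedborders`, B's `lefts`). -/
def pvLefts (borders : List (Int × Int × String)) : List (Int × Int) :=
  (borders.filter (fun c => c.2.2 == "left")).map (fun c => (c.1, c.2.1))

/-- Rows of column `c`, in order of appearance (the dict entry A builds for `c`). -/
def rowsOf (l : List (Int × Int)) (c : Int) : List Int :=
  (l.filter (fun p => p.1 == c)).map (fun x => x.2)

/-- The distinct columns, in first-appearance order (A's dict keys). -/
def colsK (l : List (Int × Int)) : List Int := PySem.Set.ofList (l.map (fun b => b.1))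

/-- Column `c` is affected by A's `-10` sentinel quirk. -/
def badB (l : List (Int × Int)) (c : Int) : Bool :=
  decide (2 ≤ (rowsOf l c).length ∧ (-9 : Int) ∈ rowsOf l c ∧ ∀ r ∈ rowsOf l c, -9 ≤ r)

/-- Run counter of A's while loop, previous element threaded. -/
def bcount : Int → List Int → Int
  | _, [] => 0
  | p, a :: t => (if a = p + 1 then 0 else 1) + bcount a t

lemma foldA_bcount (l : List Int) : ∀ (s p : Int),
    (l.foldl (fun (st : Int × Int) g => if g - st.2 ≠ 1 then (st.1 + 1, g) else (st.1, g)) (s, p)).1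
      = s + bcount p l := by
  induction l with
  | nil => intro s p; simp [bcount]
  | cons a t ih =>
    intro s p
    rcases eq_or_ne a (p + 1) with h | h
    · have h2 : ¬(a - p ≠ 1) := by omega
      simp only [List.foldl_cons, if_neg h2, bcount, if_pos h, ih]
      ring
    · have h2 : a - p ≠ 1 := by omega
      simp only [List.foldl_cons, if_pos h2, bcount, if_neg h, ih]
      ring

lemma countP_one_point {l : List Int} {x : Int} {p q : Int → Bool}
    (hn : l.Nodup) (hx : x ∈ l) (hp : p x = true) (hq : q x = false)
    (hagree : ∀ r ∈ l, r ≠ x → p r = q r) : l.countP p = l.countP q + 1 := by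
  induction l with
  | nil => cases hx
  | cons a t ih =>
    rw [List.countP_cons, List.countP_cons]
    rcases List.mem_cons.mp hx with rfl | hxt
    · have hxt : x ∉ t := (List.nodup_cons.mp hn).1
      have ht : t.countP p = t.countP q :=
        List.countP_congr (fun r hr => by
          rw [hagree r (List.mem_cons_of_mem _ hr) (fun h => hxt (h ▸ hr))])
      rw [hp, hq, ht]; simp
    · have hax : a ≠ x := fun h => (List.nodup_cons.mp hn).1 (h ▸ hxt)
      rw [hagree a (List.mem_cons_self) hax,
        ih (List.nodup_cons.mp hn).2 hxt
          (fun r hr hrx => hagree r (List.mem_cons_of_mem _ hr) hrx)]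
      ring

lemma bcount_eq (t : List Int) : ∀ p : Int, t.Pairwise (· ≤ ·) → (∀ r ∈ t, p ≤ r) →
    bcount p t
      = (t.dedup.countP (fun r => !(decide (r - 1 ∈ t) || decide (r - 1 = p))) : Int)
        + (t.length : Int) - (t.dedup.length : Int) := by
  induction t with
  | nil => intro p _ _; simp [bcount]
  | cons a u ih =>
    intro p hpw hle
    have hau : ∀ r ∈ u, a ≤ r := (List.pairwise_cons.mp hpw).1
    have hpa : p ≤ a := hle a (List.mem_cons_self)
    have ihv := ih a (List.pairwise_cons.mp hpw).2 hau
    have hdl : u.dedup.length ≤ u.length := (List.dedup_sublist u).length_le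
    have hnd : u.dedup.Nodup := List.nodup_dedup u
    have ha1u : a - 1 ∉ u := fun h => absurd (hau _ h) (by omega)
    by_cases hmem : a ∈ u
    · rw [List.dedup_cons_of_mem hmem]
      rcases eq_or_ne a (p + 1) with h1 | h1
      · -- the predicates differ exactly at a = p + 1
        have hone :
            u.dedup.countP (fun r => !(decide (r - 1 ∈ u) || decide (r - 1 = a)))
              = u.dedup.countP (fun r => !(decide (r - 1 ∈ a :: u) || decide (r - 1 = p))) + 1 := by
          refine countP_one_point hnd (List.mem_dedup.mpr hmem) ?_ ?_ ?_
          · simp only [Bool.not_eq_eq_eq_not, Bool.not_true, Bool.or_eq_false_iff,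
              decide_eq_false_iff_not]
            exact ⟨ha1u, by omega⟩
          · simp only [Bool.not_eq_eq_eq_not]
            have : a - 1 = p := by omega
            simp [this]
          · intro r _ hrx
            have hr1 : r - 1 ≠ p := by omega
            simp only [List.mem_cons, hr1, decide_false, Bool.or_false]
            by_cases h2 : r - 1 ∈ u <;> by_cases h3 : r - 1 = a <;> simp [h2, h3]
        rw [bcount, if_pos h1, ihv, hone]
        simp only [List.length_cons]
        push_cast
        omega
      · have hsame :
            u.dedup.countP (fun r => !(decide (r - 1 ∈ u) || decide (r - 1 = a)))
              = u.dedup.countP (fun r => !(decide (r - 1 ∈ a :: u) || decide (r - 1 = p))) := by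
          refine List.countP_congr (fun r hr => ?_)
          rcases eq_or_ne r (p + 1) with rfl | hrp
          · have hpu : p + 1 ∈ u := List.mem_dedup.mp hr
            have hpa' : p = a := by have := hau _ hpu; omega
            have e1 : p + 1 - 1 = a := by omega
            simp [e1]
          · have hr1 : r - 1 ≠ p := by omega
            simp only [List.mem_cons, hr1, decide_false, Bool.or_false]
            by_cases h2 : r - 1 ∈ u <;> by_cases h3 : r - 1 = a <;> simp [h2, h3]
        rw [bcount, if_neg h1, ihv, hsame]
        simp only [List.length_cons]
        push_cast
        omega
    · rw [List.dedup_cons_of_notMem hmem, List.countP_cons]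
      have hsame :
          u.dedup.countP (fun r => !(decide (r - 1 ∈ u) || decide (r - 1 = a)))
            = u.dedup.countP (fun r => !(decide (r - 1 ∈ a :: u) || decide (r - 1 = p))) := by
        refine List.countP_congr (fun r hr => ?_)
        rcases eq_or_ne r (p + 1) with rfl | hrp
        · have hpu : p + 1 ∈ u := List.mem_dedup.mp hr
          have hpa' : p = a := by
            have h4 := hau _ hpu
            rcases eq_or_ne a (p + 1) with h3 | h3
            · exact absurd (h3 ▸ hpu : a ∈ u) hmem
            · omega
          have e1 : p + 1 - 1 = a := by omega
          simp [e1]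
        · have hr1 : r - 1 ≠ p := by omega
          simp only [List.mem_cons, hr1, decide_false, Bool.or_false]
          by_cases h2 : r - 1 ∈ u <;> by_cases h3 : r - 1 = a <;> simp [h2, h3]
      have hheada : (!(decide (a - 1 ∈ a :: u) || decide (a - 1 = p)))
          = !decide (a - 1 = p) := by
        have : a - 1 ∉ a :: u := by
          simp only [List.mem_cons, not_or]
          exact ⟨by omega, ha1u⟩
        simp [this]
      rw [bcount, ihv, hsame, hheada]
      rcases eq_or_ne a (p + 1) with h1 | h1
      · have : a - 1 = p := by omega
        rw [if_pos h1]
        simp only [this, decide_true, Bool.not_true]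
        simp only [List.length_cons]
        push_cast
        omega
      · have : a - 1 ≠ p := by omega
        rw [if_neg h1]
        simp only [this, decide_false, Bool.not_false]
        simp only [List.length_cons]
        push_cast
        omega

/-- Per-column identity: A's run count over the sorted rows of a column, versus B's
"no upward neighbour" count plus the duplicate correction, minus 1 on a quirky column. -/
lemma calc_col (L : List Int) (hne : L ≠ []) :
    calcSidesDiff (PySem.List.sorted L id) =
      ((L.dedup.countP (fun r => !decide (r - 1 ∈ L)) : Int)
          + (L.length : Int) - (L.dedup.length : Int))
        - (if 2 ≤ L.length ∧ (-9 : Int) ∈ L ∧ (∀ r ∈ L, -9 ≤ r) then 1 else 0) := by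
  have hperm : (PySem.List.sorted L id).Perm L := PySem.List.sorted_perm L id false
  have hpw : (PySem.List.sorted L id).Pairwise (· ≤ ·) := by
    simpa using PySem.List.sorted_pairwise L id
  have hlen : (PySem.List.sorted L id).length = L.length := hperm.length_eq
  by_cases h1 : L.length = 1
  · obtain ⟨x, rfl⟩ := List.length_eq_one_iff.mp h1
    have hl1 : (PySem.List.sorted [x] id).length = 1 := by simp [hlen]
    rw [calcSidesDiff, if_pos hl1]
    simp
  · have h0 : L.length ≠ 0 := by simpa using hne
    have h2 : 2 ≤ L.length := by omega
    obtain ⟨a, t, hl⟩ : ∃ a t, PySem.List.sorted L id = a :: t := by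
      rcases hcl : PySem.List.sorted L id with _ | ⟨a, t⟩
      · exfalso; rw [hcl] at hlen; simp at hlen; omega
      · exact ⟨a, t, rfl⟩
    have hat : ∀ r ∈ t, a ≤ r := (List.pairwise_cons.mp (hl ▸ hpw)).1
    have htpw : t.Pairwise (· ≤ ·) := (List.pairwise_cons.mp (hl ▸ hpw)).2
    rw [calcSidesDiff, if_neg (by rw [hlen]; exact h1), hl, List.foldl_cons]
    have hmemL : ∀ r : Int, r ∈ L ↔ r = a ∨ r ∈ t := by
      intro r
      rw [← hperm.mem_iff, hl, List.mem_cons]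
    -- transfer the RHS from L to the sorted list a :: t
    have hdperm : (a :: t).dedup.Perm L.dedup := (hl ▸ hperm).dedup
    have hcntL : L.dedup.countP (fun r => !decide (r - 1 ∈ L))
        = (a :: t).dedup.countP (fun r => !decide (r - 1 ∈ a :: t)) := by
      rw [← hdperm.countP_eq]
      refine List.countP_congr (fun r _ => ?_)
      have hiff : (r - 1 ∈ L) ↔ (r - 1 ∈ a :: t) := by rw [hmemL, List.mem_cons]
      simp [hiff]
    have hdlenL : L.dedup.length = (a :: t).dedup.length := (hdperm.length_eq).symm
    have hlenL : L.length = (a :: t).length := (hl ▸ hlen).symm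
    -- the quirk condition is exactly "the minimum is -9"
    have hbad : (2 ≤ L.length ∧ (-9 : Int) ∈ L ∧ (∀ r ∈ L, -9 ≤ r)) ↔ a = -9 := by
      constructor
      · rintro ⟨-, hm, hall⟩
        have haL : a ∈ L := (hmemL a).mpr (Or.inl rfl)
        have h9a : -9 ≤ a := hall a haL
        rcases (hmemL (-9)).mp hm with h | h
        · omega
        · have := hat _ h; omega
      · rintro rfl
        refine ⟨h2, (hmemL (-9)).mpr (Or.inl rfl), fun r hr => ?_⟩
        rcases (hmemL r).mp hr with rfl | h
        · omega
        · exact hat _ h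
    rw [if_congr hbad rfl rfl, hcntL, hdlenL, hlenL]
    -- evaluate the A side: first loop step, then the threaded run counter
    have hkey := bcount_eq t a htpw hat
    have hfold := foldA_bcount t (if a - (-10) ≠ 1 then (0 : Int) + 1 else 0) a
    have hstep : (if a - (-10) ≠ 1 then ((0 : Int) + 1, a) else ((0 : Int), a))
        = ((if a - (-10) ≠ 1 then ((0 : Int) + 1) else 0), a) := by
      split <;> rfl
    rw [hstep, hfold, hkey]
    -- identify the two predicates (pointwise equal booleans)
    have hpred : ∀ r : Int, (!(decide (r - 1 ∈ t) || decide (r - 1 = a)))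
        = (!decide (r - 1 ∈ a :: t)) := by
      intro r
      by_cases h2' : r - 1 ∈ t <;> by_cases h3 : r - 1 = a <;>
        simp [List.mem_cons, h2', h3]
    have hcnteq : t.dedup.countP (fun r => !(decide (r - 1 ∈ t) || decide (r - 1 = a)))
        = t.dedup.countP (fun r => !decide (r - 1 ∈ a :: t)) :=
      List.countP_congr (fun r _ => by rw [hpred r])
    rw [hcnteq]
    have hdl : t.dedup.length ≤ t.length := (List.dedup_sublist t).length_le
    by_cases hmem : a ∈ t
    · rw [List.dedup_cons_of_mem hmem]
      rcases eq_or_ne a (-9) with h | h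
      · rw [if_pos h]
        have : ¬ (a - (-10) ≠ 1) := by omega
        rw [if_neg this]
        simp only [List.length_cons]
        push_cast
        omega
      · rw [if_neg h]
        have : a - (-10) ≠ 1 := by omega
        rw [if_pos this]
        simp only [List.length_cons]
        push_cast
        omega
    · rw [List.dedup_cons_of_notMem hmem, List.countP_cons]
      have hha : (!decide (a - 1 ∈ a :: t)) = true := by
        have h3 : a - 1 ∉ a :: t := by
          simp only [List.mem_cons, not_or]
          exact ⟨by omega, fun hh => absurd (hat _ hh) (by omega)⟩
        simp [h3]
      rw [hha]
      rcases eq_or_ne a (-9) with h | h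
      · rw [if_pos h]
        have : ¬ (a - (-10) ≠ 1) := by omega
        rw [if_neg this]
        simp only [List.length_cons]
        push_cast
        omega
      · rw [if_neg h]
        have : a - (-10) ≠ 1 := by omega
        rw [if_pos this]
        simp only [List.length_cons]
        push_cast
        omega

lemma mem_rowsOf (l : List (Int × Int)) (c r : Int) : r ∈ rowsOf l c ↔ (c, r) ∈ l := by
  simp only [rowsOf, List.mem_map, List.mem_filter, beq_iff_eq]
  constructor
  · rintro ⟨⟨x, y⟩, ⟨hm, hc⟩, hr⟩
    cases hc; cases hr; exact hm
  · intro h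
    exact ⟨(c, r), ⟨h, rfl⟩, rfl⟩

lemma nodup_pairs (K : List Int) (g : Int → List Int) (hK : K.Nodup) (hg : ∀ c, (g c).Nodup) :
    (K.flatMap (fun c => (g c).map (fun r => (c, r)))).Nodup := by
  induction K with
  | nil => simp
  | cons c K' ih =>
    rw [List.flatMap_cons]
    refine List.Nodup.append ?_ (ih (List.nodup_cons.mp hK).2) ?_
    · exact (hg c).map (fun r1 r2 h => congrArg Prod.snd h)
    · intro x hx hx'
      obtain ⟨r, -, rfl⟩ := List.mem_map.mp hx
      obtain ⟨c', hc', hcm⟩ := List.mem_flatMap.mp hx'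
      obtain ⟨r', -, h'⟩ := List.mem_map.mp hcm
      have : c' = c := congrArg Prod.fst h'
      exact (List.nodup_cons.mp hK).1 (this ▸ hc')

lemma sum_len_parts : ∀ (K : List Int) (l : List (Int × Int)), K.Nodup →
    (∀ p ∈ l, p.1 ∈ K) →
    (K.map (fun c => (l.filter (fun p => p.1 == c)).length)).sum = l.length := by
  intro K
  induction K with
  | nil =>
    intro l _ hcov
    have : l = [] := List.eq_nil_iff_forall_not_mem.mpr (fun p hp => by simpa using hcov p hp)
    simp [this]
  | cons c K' ih =>
    intro l hK hcov
    have hsplit : (l.filter (fun p => p.1 == c)).length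
        + (l.filter (fun p => !(p.1 == c))).length = l.length :=
      (List.length_eq_length_filter_add (fun p => p.1 == c) (l := l)).symm ▸ rfl
    have hmap : ∀ c' ∈ K', (l.filter (fun p => p.1 == c')).length
        = ((l.filter (fun p => !(p.1 == c))).filter (fun p => p.1 == c')).length := by
      intro c' hc'
      have hne : c' ≠ c := fun h => (List.nodup_cons.mp hK).1 (h ▸ hc')
      rw [List.filter_filter]
      refine congrArg _ (List.filter_congr (fun p _ => ?_))
      by_cases h : p.1 = c'
      · simp [h, hne]
      · simp [h]
    rw [List.map_cons, List.sum_cons, List.map_congr_left hmap,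
      ih (l.filter (fun p => !(p.1 == c))) (List.nodup_cons.mp hK).2 ?_]
    · omega
    · intro p hp
      have hm := List.mem_filter.mp hp
      have := hcov p hm.1
      rcases List.mem_cons.mp this with h | h
      · exfalso
        have := hm.2
        simp [h] at this
      · exact h

lemma sum_map_comb {α : Type} (K : List α) (f g h w : α → Int) :
    (K.map (fun c => f c + g c - h c - w c)).sum
      = (K.map f).sum + (K.map g).sum - (K.map h).sum - (K.map w).sum := by
  induction K with
  | nil => simp
  | cons c K' ih => simp only [List.map_cons, List.sum_cons, ih]; ring

lemma sum_map_natcast {α : Type} (K : List α) (f : α → Nat) :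
    (K.map (fun c => ((f c : Nat) : Int))).sum = (((K.map f).sum : Nat) : Int) := by
  induction K with
  | nil => simp
  | cons c K' ih => simp only [List.map_cons, List.sum_cons, ih]; push_cast; ring

lemma A_eq (borders : List (Int × Int × String)) :
    sidesLeft borders =
      ((colsK (pvLefts borders)).map
        (fun c => calcSidesDiff (PySem.List.sorted (rowsOf (pvLefts borders) c) id))).sum := by
  have hstep : (fun (d : PySem.Dict Int (List Int)) (b : Int × Int) =>
        if d.contains b.1 then d.modify b.1 [] (fun l => l ++ [b.2])
        else d.insert b.1 [b.2])
      = fun d b => d.modify b.1 [] (fun l => l ++ [b.2]) := by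
    funext d b
    by_cases h : d.contains b.1
    · simp [h]
    · have h' : d.contains b.1 = false := by simpa using h
      have hg : d.getD b.1 ([] : List Int) = [] := PySem.Dict.getD_of_not_contains d _ h'
      simp [PySem.Dict.modify, hg]
  unfold sidesLeft pvLefts
  simp only [hstep]
  set L := (borders.filter (fun c => c.2.2 == "left")).map (fun c => (c.1, c.2.1)) with hL
  set D := L.foldl (fun d b => d.modify b.1 [] (fun l => l ++ [b.2])) PySem.Dict.empty with hD
  have hkeys : D.keys = colsK L := by
    rw [hD, PySem.Dict.keys_foldl_modify_key L (fun b => b.1) [] (fun _ b => fun l => l ++ [b.2]),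
      PySem.Dict.keys_empty, PySem.Set.update_nil_left]
    rfl
  have hnodk : D.keys.Nodup := by
    rw [hD]
    exact PySem.Dict.nodup_keys_foldl_modify_key L (fun b => b.1) [] (fun _ b => fun l => l ++ [b.2])
      PySem.Dict.empty PySem.Dict.nodup_keys_empty
  have hget : ∀ c, D.getD c [] = rowsOf L c := by
    intro c
    rw [hD, PySem.Dict.getD_foldl_modify_append L PySem.Dict.empty c, PySem.Dict.getD_empty]
    rfl
  rw [PySem.List.foldl_add D.values (fun g => calcSidesDiff (PySem.List.sorted g id)) 0,
    PySem.Dict.values_eq_map_keys D hnodk [], hkeys, List.map_map, zero_add]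
  exact congrArg _ (List.map_congr_left (fun c _ => by simp [Function.comp, hget c]))

lemma B_eq (borders : List (Int × Int × String)) :
    sidesLeft_alt borders =
      ((PySem.Set.ofList (pvLefts borders)).countP
          (fun p => !(PySem.Set.contains (PySem.Set.ofList (pvLefts borders)) (p.1, p.2 - 1))) : Int)
        + ((pvLefts borders).length : Int) - ((PySem.Set.ofList (pvLefts borders)).length : Int) := by
  unfold sidesLeft_alt pvLefts
  dsimp only
  set L := (borders.filter (fun c => c.2.2 == "left")).map (fun c => (c.1, c.2.1)) with hL
  set cells := PySem.Set.ofList L with hcells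
  have hstep : (fun (acc : Int) (p : Int × Int) =>
        if PySem.Set.contains cells (p.1, p.2 - 1) then acc else acc + 1)
      = fun (acc : Int) p => if (!(PySem.Set.contains cells (p.1, p.2 - 1))) = true
          then acc + 1 else acc := by
    funext acc p
    cases hb : PySem.Set.contains cells (p.1, p.2 - 1) <;> simp
  rw [hstep, PySem.List.foldl_if_add_one (fun p : Int × Int =>
    !(PySem.Set.contains cells (p.1, p.2 - 1))) cells 0]
  ring

lemma master (borders : List (Int × Int × String)) :
    sidesLeft borders = sidesLeft_alt borders
      - ((colsK (pvLefts borders)).countP (badB (pvLefts borders)) : Int) := by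
  rw [A_eq, B_eq]
  set L := pvLefts borders with hLdef
  set K := colsK L with hKdef
  set cells := PySem.Set.ofList L with hcells
  have hKnodup : K.Nodup := PySem.Set.nodup_ofList _
  have hmemK : ∀ c, c ∈ K ↔ ∃ r, (c, r) ∈ L := by
    intro c
    rw [hKdef]
    unfold colsK
    rw [PySem.Set.mem_ofList]
    constructor
    · intro h
      obtain ⟨⟨x, y⟩, hm, rfl⟩ := List.mem_map.mp h
      exact ⟨y, hm⟩
    · rintro ⟨r, h⟩
      exact List.mem_map.mpr ⟨(c, r), h, rfl⟩
  have hne : ∀ c ∈ K, rowsOf L c ≠ [] := by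
    intro c hc hnil
    obtain ⟨r, hr⟩ := (hmemK c).mp hc
    have : r ∈ rowsOf L c := (mem_rowsOf L c r).mpr hr
    rw [hnil] at this
    cases this
  -- per-column rewriting
  rw [List.map_congr_left (fun c hc => calc_col (rowsOf L c) (hne c hc))]
  rw [show (fun c => ((((rowsOf L c).dedup.countP (fun r => !decide (r - 1 ∈ rowsOf L c)) : Nat) : Int)
        + ((rowsOf L c).length : Int) - (((rowsOf L c).dedup.length : Nat) : Int))
        - (if 2 ≤ (rowsOf L c).length ∧ (-9 : Int) ∈ rowsOf L c ∧ (∀ r ∈ rowsOf L c, -9 ≤ r)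
            then 1 else 0))
      = fun c => (((rowsOf L c).dedup.countP (fun r => !decide (r - 1 ∈ rowsOf L c)) : Int)
        + ((rowsOf L c).length : Int)
        - (((rowsOf L c).dedup.length : Nat) : Int)
        - (if badB L c = true then (1 : Int) else 0)) from by
      funext c
      congr 1
      unfold badB
      by_cases h : 2 ≤ (rowsOf L c).length ∧ (-9 : Int) ∈ rowsOf L c ∧ (∀ r ∈ rowsOf L c, -9 ≤ r) <;>
        simp [h]]
  rw [show (fun c => (((rowsOf L c).dedup.countP (fun r => !decide (r - 1 ∈ rowsOf L c)) : Int)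
        + ((rowsOf L c).length : Int)
        - (((rowsOf L c).dedup.length : Nat) : Int)
        - (if badB L c = true then (1 : Int) else 0)))
      = fun c => ((fun c => ((rowsOf L c).dedup.countP (fun r => !decide (r - 1 ∈ rowsOf L c)) : Int)) c
        + (fun c => ((rowsOf L c).length : Int)) c
        - (fun c => (((rowsOf L c).dedup.length : Nat) : Int)) c
        - (fun c => (if badB L c = true then (1 : Int) else 0)) c) from rfl]
  rw [sum_map_comb]
  -- the permutation between B's set and the column-wise distinct rows
  set X := K.flatMap (fun c => (rowsOf L c).dedup.map (fun r => (c, r))) with hX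
  have hXnodup : X.Nodup := nodup_pairs K _ hKnodup (fun c => List.nodup_dedup _)
  have hXmem : ∀ a : Int × Int, a ∈ X ↔ a ∈ L := by
    rintro ⟨c, r⟩
    rw [hX]
    simp only [List.mem_flatMap, List.mem_map, List.mem_dedup]
    constructor
    · rintro ⟨c', -, r', hr', h⟩
      have h1 : c' = c := congrArg Prod.fst h
      have h2 : r' = r := congrArg Prod.snd h
      have h3 := (mem_rowsOf L c' r').mp hr'
      rw [h1, h2] at h3
      exact h3
    · intro h
      exact ⟨c, (hmemK c).mpr ⟨r, h⟩, r, (mem_rowsOf L c r).mpr h, rfl⟩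
  have hperm : cells.Perm X := by
    refine (List.perm_ext_iff_of_nodup (PySem.Set.nodup_ofList L) hXnodup).mpr (fun a => ?_)
    rw [hXmem a]
    exact PySem.Set.mem_ofList L a
  -- S1: the countP sums agree
  have hS1 : (K.map (fun c => ((rowsOf L c).dedup.countP
        (fun r => !decide (r - 1 ∈ rowsOf L c)) : Int))).sum
      = ((cells.countP (fun p => !(PySem.Set.contains cells (p.1, p.2 - 1))) : Nat) : Int) := by
    rw [sum_map_natcast]
    congr 1
    rw [hperm.countP_eq, hX, List.countP_flatMap]
    refine (congrArg List.sum (List.map_congr_left (fun c _ => ?_))).symm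
    simp only [Function.comp, List.countP_map]
    refine (List.countP_congr (fun r _ => ?_)).symm
    have hiff : PySem.Set.contains cells (c, r - 1) = true ↔ r - 1 ∈ rowsOf L c := by
      rw [PySem.Set.contains_iff]
      exact (PySem.Set.mem_ofList L (c, r - 1)).trans (mem_rowsOf L c (r - 1)).symm
    by_cases h : r - 1 ∈ rowsOf L c
    · have h2 := hiff.mpr h
      have h3 : (c, r - 1) ∈ cells := (PySem.Set.contains_iff cells (c, r - 1)).mp h2
      simp [Function.comp, h, h3]
    · have h2 : PySem.Set.contains cells (c, r - 1) = false := by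
        rcases hb : PySem.Set.contains cells (c, r - 1) with _ | _
        · rfl
        · exact absurd (hiff.mp hb) h
      have h3 : (c, r - 1) ∉ cells := fun hm => by
        rw [(PySem.Set.contains_iff cells (c, r - 1)).mpr hm] at h2
        cases h2
      simp [Function.comp, h, h3]
  -- S2: the dedup lengths sum to the set's size
  have hS2 : (K.map (fun c => (((rowsOf L c).dedup.length : Nat) : Int))).sum
      = ((cells.length : Nat) : Int) := by
    rw [sum_map_natcast]
    congr 1
    rw [hperm.length_eq, hX, List.length_flatMap]
    refine (congrArg List.sum (List.map_congr_left (fun c _ => ?_))).symm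
    rw [List.length_map]
  -- S3: the row multiplicities sum to the number of left cells
  have hS3 : (K.map (fun c => ((rowsOf L c).length : Int))).sum = ((L.length : Nat) : Int) := by
    have hcov : ∀ p ∈ L, p.1 ∈ K := by
      rintro ⟨c, r⟩ hp
      exact (hmemK c).mpr ⟨r, hp⟩
    have hsl := sum_len_parts K L hKnodup hcov
    rw [show (fun c => ((rowsOf L c).length : Int))
        = fun c => (((rowsOf L c).length : Nat) : Int) from rfl, sum_map_natcast]
    congr 1
    rw [← hsl]
    refine congrArg List.sum (List.map_congr_left (fun c _ => ?_))
    simp [rowsOf]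
  -- S4: the quirk indicator sums to the bad-column count
  have hS4 : (K.map (fun c => (if badB L c = true then (1 : Int) else 0))).sum
      = ((K.countP (badB L) : Nat) : Int) := PySem.List.sum_map_ite_one_zero (badB L) K
  rw [hS1, hS2, hS3, hS4]

lemma rows_len_eq (borders : List (Int × Int × String)) (c : Int) :
    (rowsOf (pvLefts borders) c).length
      = borders.countP (fun q => q.1 == c && q.2.2 == "left") := by
  unfold rowsOf pvLefts
  rw [List.length_map, List.filter_map, List.length_map, ← List.countP_eq_length_filter,
    List.countP_filter]
  rfl

lemma mem_pvLefts (borders : List (Int × Int × String)) (c r : Int) :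
    (c, r) ∈ pvLefts borders ↔ ∃ q ∈ borders, q.2.2 = "left" ∧ q.1 = c ∧ q.2.1 = r := by
  unfold pvLefts
  simp only [List.mem_map, List.mem_filter, beq_iff_eq]
  constructor
  · rintro ⟨⟨x, y, s⟩, ⟨hm, hs⟩, hpr⟩
    exact ⟨(x, y, s), hm, hs, congrArg Prod.fst hpr, congrArg (fun p => p.2) hpr⟩
  · rintro ⟨⟨x, y, s⟩, hm, hs, hc, hr⟩
    cases hc; cases hr
    exact ⟨(x, y, s), ⟨hm, hs⟩, rfl⟩

lemma erase_iff_count (borders : List (Int × Int × String)) (p : Int × Int × String)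
    (hp : p ∈ borders) (hps : p.2.2 = "left") :
    (∃ q ∈ borders.erase p, q.1 = p.1 ∧ q.2.2 = "left")
      ↔ 2 ≤ borders.countP (fun q => q.1 == p.1 && q.2.2 == "left") := by
  have hperm : borders.Perm (p :: borders.erase p) := List.perm_cons_erase hp
  have hPp : (p.1 == p.1 && p.2.2 == "left") = true := by simp [hps]
  rw [hperm.countP_eq, List.countP_cons, hPp, if_pos rfl]
  constructor
  · rintro ⟨q, hq, hq1, hq2⟩
    have hpos : 0 < (borders.erase p).countP (fun q => q.1 == p.1 && q.2.2 == "left") :=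
      List.countP_pos_iff.mpr ⟨q, hq, by simp [hq1, hq2]⟩
    omega
  · intro h2
    have hpos : 0 < (borders.erase p).countP (fun q => q.1 == p.1 && q.2.2 == "left") := by
      omega
    obtain ⟨q, hq, hP⟩ := List.countP_pos_iff.mp hpos
    simp only [Bool.and_eq_true, beq_iff_eq] at hP
    exact ⟨q, hq, hP.1, hP.2⟩

lemma bad_iff_D (borders : List (Int × Int × String)) :
    (∃ c ∈ colsK (pvLefts borders), badB (pvLefts borders) c = true) ↔ D_sidesLeft borders := by
  constructor
  · rintro ⟨c, hcK, hb⟩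
    have hb' := of_decide_eq_true hb
    obtain ⟨hlen, hm9, hall⟩ := hb'
    obtain ⟨q, hq, hqs, hqc, hqr⟩ := (mem_pvLefts borders c (-9)).mp
      ((mem_rowsOf (pvLefts borders) c (-9)).mp hm9)
    refine ⟨q, hq, ?_, ?_, ?_⟩
    · rw [Prod.ext_iff]
      exact ⟨hqr, hqs⟩
    · rw [erase_iff_count borders q hq hqs, ← rows_len_eq, hqc]
      exact hlen
    · intro q' hq' hc' hs'
      have hmem : q'.2.1 ∈ rowsOf (pvLefts borders) c := by
        rw [mem_rowsOf, mem_pvLefts]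
        exact ⟨q', hq', hs', hqc ▸ hc', rfl⟩
      exact hall _ hmem
  · rintro ⟨p, hp, hp2, herase, hall⟩
    have hpr : p.2.1 = -9 := congrArg Prod.fst hp2
    have hps : p.2.2 = "left" := congrArg Prod.snd hp2
    have hlen := (erase_iff_count borders p hp hps).mp herase
    refine ⟨p.1, ?_, ?_⟩
    · unfold colsK
      rw [PySem.Set.mem_ofList]
      refine List.mem_map.mpr ⟨(p.1, -9), ?_, rfl⟩
      rw [mem_pvLefts]
      exact ⟨p, hp, hps, rfl, hpr⟩
    · apply decide_eq_true
      refine ⟨?_, ?_, ?_⟩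
      · rw [rows_len_eq]
        exact hlen
      · rw [mem_rowsOf, mem_pvLefts]
        exact ⟨p, hp, hps, rfl, hpr⟩
      · intro r hr
        obtain ⟨q, hq, hqs, hqc, hqr⟩ := (mem_pvLefts borders p.1 r).mp
          ((mem_rowsOf (pvLefts borders) p.1 r).mp hr)
        exact hqr ▸ hall q hq hqc hqs

-- ===== VERDICT (by name: the statement is the Claim_ definition above) =====
theorem sidesLeft_spec : Claim_unchanged_sidesLeft := by
  intro borders _ hnD
  rw [master]
  have h0 : (colsK (pvLefts borders)).countP (badB (pvLefts borders)) = 0 := by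
    rw [List.countP_eq_zero]
    intro c hc hb
    exact hnD ((bad_iff_D borders).mp ⟨c, hc, hb⟩)
  rw [h0]
  simp

theorem sidesLeft_changed : Claim_changed_sidesLeft := by
  unfold Claim_changed_sidesLeft; decide

theorem sidesLeft_tight : Claim_exact_sidesLeft := by
  intro borders _ hD
  rw [master]
  have h1 : 0 < (colsK (pvLefts borders)).countP (badB (pvLefts borders)) := by
    rw [List.countP_pos_iff]
    exact (bad_iff_D borders).mpr hD
  intro heq
  omega
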